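-- pv_equiv track=rewrite | github.com/rochellebrant/octopus | common/common/funcs/utils.py | ensure_dict_key_prefix
-- ===== SOURCE A (Python) =====
-- from typing import Any, Dict, List, Optional, Sequence, Union
--
-- def ensure_dict_key_prefix(target_dict: Dict[str, Any], prefix: str) -> Dict[str, Any]:
--     """
--     Returns a new dictionary where all keys are guaranteed to start with the specified prefix.
--     Smartly handles partial overlaps to avoid duplicating parts of the prefix.
--
--     Args:
--         target_dict (Dict[str, Any]): The original dictionary.
--         prefix (str): The string prefix to ensure on every key.
--
--     Returns:
--         Dict[str, Any]: A new dictionary with normalized keys.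
--
--     Example:
--         prefix = "dev_gold_model_"
--         keys = ["dev_gold_model_table", "gold_model_table", "table"]
--         # Resulting keys will ALL perfectly become "dev_gold_model_table"
--     """
--     if not prefix:
--         return target_dict.copy()
--
--     updated_dict = {}
--     for key, value in target_dict.items():
--         # 1. If it already has the exact prefix, keep it as is
--         if key.startswith(prefix):
--             updated_dict[key] = value
--             continue
--
--         # 2. Smart overlap detection: Find the longest end-chunk of the prefix
--         # that matches the start-chunk of the key (e.g., "gold_model_")
--         overlap_found = False
--         for i in range(len(prefix), 0, -1):
--             partial_prefix = prefix[-i:]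
--             if key.startswith(partial_prefix):
--                 # Prepend only the missing part of the prefix
--                 updated_dict[prefix[:-i] + key] = value
--                 overlap_found = True
--                 break
--
--         # 3. If there is no overlap at all, just safely prepend the whole thing
--         if not overlap_found:
--             updated_dict[prefix + key] = value
--
--     return updated_dict
-- ===== SOURCE B (Python) =====
-- def _overlap_start(prefix, key):
--     # Online multi-candidate matching: one left-to-right sweep over `prefix`
--     # maintains the list of alignment positions j whose window prefix[j:] still
--     # matches the start of `key`; the smallest surviving j is the cut point.
--     alive = []
--     for idx, c in enumerate(prefix):
--         alive.append(idx)
--         alive = [j for j in alive if idx - j < len(key) and key[idx - j] == c]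
--     return alive[0] if alive else len(prefix)
--
--
-- def ensure_dict_key_prefix(target_dict, prefix):
--     if not prefix:
--         return target_dict.copy()
--     updated = {}
--     for key, value in target_dict.items():
--         updated[prefix[:_overlap_start(prefix, key)] + key] = value
--     return updated
-- ===== Notes on version B (the rewrite author's own statement) =====
-- stated objective: alternative
-- what changed: Per-key overlap is no longer found by probing each suffix of the prefix with startswith (A's descending loop with a flag); B makes ONE left-to-right sweep over the prefix maintaining a list of alive alignment positions (online multi-candidate matching), each new position is added and positions whose expected key character mismatches are filtered out; the smallest survivor is the cut point.
import Mathlib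
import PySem

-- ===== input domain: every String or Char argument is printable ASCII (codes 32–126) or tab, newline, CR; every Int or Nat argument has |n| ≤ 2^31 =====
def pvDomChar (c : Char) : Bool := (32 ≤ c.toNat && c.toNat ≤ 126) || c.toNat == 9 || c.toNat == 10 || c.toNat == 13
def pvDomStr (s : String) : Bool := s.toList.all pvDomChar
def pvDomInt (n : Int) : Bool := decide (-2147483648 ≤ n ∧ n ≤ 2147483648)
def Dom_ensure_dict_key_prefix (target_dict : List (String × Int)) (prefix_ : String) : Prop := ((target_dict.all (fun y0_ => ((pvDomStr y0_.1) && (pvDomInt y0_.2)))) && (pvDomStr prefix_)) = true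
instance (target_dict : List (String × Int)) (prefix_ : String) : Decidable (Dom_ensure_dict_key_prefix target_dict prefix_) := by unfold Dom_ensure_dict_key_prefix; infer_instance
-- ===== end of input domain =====

-- B replaces A's per-suffix startswith probes (descending loop with a flag) by one left-to-right
-- sweep over the prefix that maintains the list of alive alignment positions (online
-- multi-candidate matching); objective: alternative (same worst-case cost, no speed claim).

-- ===== PORT A =====
-- A's inner `for i in range(len(prefix), 0, -1)` loop with its break/flag:
-- `some newKey` when an overlap is found, `none` when `overlap_found` stays False.
def pvA_overlap (key : List Char) (prefix_ : List Char) : List Int → Option (List Char)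
  | [] => none
  | i :: rest =>
      let partial_prefix := PySem.Chars.slice prefix_ (some (-i)) none
      if PySem.Chars.startswith key partial_prefix then
        some (PySem.Chars.slice prefix_ none (some (-i)) ++ key)
      else pvA_overlap key prefix_ rest

def ensure_dict_key_prefix (target_dict : List (String × Int)) (prefix_ : String) : List (String × Int) :=
  if prefix_ = "" then target_dict
  else
    (target_dict.foldl (fun (updated : PySem.Dict String Int) kv =>
        if PySem.Chars.startswith kv.1.toList prefix_.toList then
          updated.insert kv.1 kv.2
        else
          match pvA_overlap kv.1.toList prefix_.toList
              (PySem.List.pyRange (PySem.Str.len prefix_) 0 (-1)) with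
          | some nk => updated.insert (String.ofList nk) kv.2
          | none => updated.insert (String.ofList (prefix_.toList ++ kv.1.toList)) kv.2)
      PySem.Dict.empty).items

-- ===== PORT B =====
-- Source B's sieve body: `alive.append(idx); alive = [j for j in alive if idx - j < len(key) and key[idx - j] == c]`
def pvB_step (K : List Char) (alive : List Int) (idx : Int) (c : Char) : List Int :=
  (alive ++ [idx]).filter (fun j =>
    decide (idx - j < (K.length : Int)) && (PySem.List.pyGetD K (idx - j) ' ' == c))

-- Source B's `_overlap_start`: the sweep over `enumerate(prefix)`, then `alive[0] if alive else len(prefix)`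
def pvB_overlapStart (prefix_ K : List Char) : Int :=
  match (PySem.List.enumerate prefix_ 0).foldl (fun alive ic => pvB_step K alive ic.1 ic.2) [] with
  | [] => PySem.Chars.len prefix_
  | j :: _ => j

def ensure_dict_key_prefix_alt (target_dict : List (String × Int)) (prefix_ : String) : List (String × Int) :=
  if prefix_ = "" then target_dict
  else
    (target_dict.foldl (fun (d : PySem.Dict String Int) kv =>
        d.insert (String.ofList
          (PySem.Chars.slice prefix_.toList none (some (pvB_overlapStart prefix_.toList kv.1.toList))
            ++ kv.1.toList)) kv.2)
      PySem.Dict.empty).items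

-- ===== PRECONDITION & SPEC =====
def Spec_ensure_dict_key_prefix (target_dict : List (String × Int)) (prefix_ : String) (out : List (String × Int)) : Prop := out = ensure_dict_key_prefix_alt target_dict prefix_
instance (target_dict : List (String × Int)) (prefix_ : String) (out : List (String × Int)) : Decidable (Spec_ensure_dict_key_prefix target_dict prefix_ out) := by unfold Spec_ensure_dict_key_prefix; infer_instance

-- ===== CLAIM (what is proved, stated in full; the proofs are below) =====
def Claim_equal_ensure_dict_key_prefix : Prop := ∀ (target_dict : List (String × Int)) (prefix_ : String), Dom_ensure_dict_key_prefix target_dict prefix_ → Spec_ensure_dict_key_prefix target_dict prefix_ (ensure_dict_key_prefix target_dict prefix_)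

-- ===== LEMMAS AND PROOFS =====

-- Reference form of the per-key answer: first cut j in js with prefix[j:] a prefix of the key
-- gives prefix[:j] ++ key, else the whole prefix is prepended.
def pvMergeN (P K : List Char) : List Nat → List Char
  | [] => P ++ K
  | j :: rest =>
      if PySem.Chars.startswith K (P.drop j) then P.take j ++ K else pvMergeN P K rest

-- ---- A side: A's per-key computation equals pvMergeN over the descending range ----

theorem pvA_loop_eq (P K : List Char) (js : List Nat) (hb : ∀ j ∈ js, j < P.length) :
    (match pvA_overlap K P (js.map (fun (j : Nat) => (((P.length - j : Nat)) : Int))) with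
     | some nk => nk
     | none => P ++ K) = pvMergeN P K js := by
  induction js with
  | nil => rfl
  | cons j rest ih =>
    have hj : j < P.length := hb j (List.mem_cons_self ..)
    have hk : 0 < P.length - j := by omega
    have hjj : P.length - (P.length - j) = j := by omega
    simp only [List.map_cons, pvA_overlap, pvMergeN, PySem.Chars.slice_eq_listSlice,
      PySem.List.slice_from_neg_natCast P _ hk, PySem.List.slice_to_neg_natCast P _ hk, hjj]
    split_ifs with hc
    · rfl
    · exact ih (fun a ha => hb a (List.mem_cons_of_mem _ ha))

theorem pv_pyRange_down (m : Nat) :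
    PySem.List.pyRange (m : Int) 0 (-1) = (List.range m).map (fun (j : Nat) => (((m - j : Nat)) : Int)) := by
  simp only [PySem.List.pyRange]
  rw [if_neg (by omega)]
  by_cases hm : 0 < m
  · rw [if_neg (by omega), if_pos (by exact_mod_cast hm)]
    have h1 : ((m : Int) - 0 + - -1 - 1) / - -1 = (m : Int) := by norm_num
    rw [h1]
    simp only [Int.toNat_natCast]
    apply List.map_congr_left
    intro k hk
    have : k < m := List.mem_range.mp hk
    omega
  · have hm0 : m = 0 := by omega
    subst hm0
    simp

-- A's whole per-key computation (fast path + descending loop + fallback) equals pvMergeN.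
theorem pvA_key_eq (P K : List Char) (hP : P ≠ []) :
    (if PySem.Chars.startswith K P then K
     else match pvA_overlap K P (PySem.List.pyRange (P.length : Int) 0 (-1)) with
          | some nk => nk
          | none => P ++ K)
    = pvMergeN P K (List.range P.length) := by
  obtain ⟨n, hn⟩ : ∃ n, P.length = n + 1 := ⟨P.length - 1, by cases P <;> simp_all⟩
  by_cases hc : PySem.Chars.startswith K P
  · rw [if_pos hc, hn, List.range_succ_eq_map]
    simp only [pvMergeN, List.drop_zero, hc, if_true, List.take_zero, List.nil_append]
  · rw [if_neg hc, pv_pyRange_down]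
    exact pvA_loop_eq P K _ (fun j hj => List.mem_range.mp hj)

-- ---- B side: the sieve's final alive list, characterised as a filter ----

-- "alignment j is still alive after t characters of the prefix": prefix[j:t] matches key[:t-j]
def pvCondF (P K : List Char) (t : Nat) (j : Nat) : Bool := ((P.drop j).take (t - j)).isPrefixOf K

theorem pv_prefix_snoc (l K : List Char) (a : Char) :
    (l ++ [a]) <+: K ↔ l <+: K ∧ (l.length < K.length ∧ K.getD l.length ' ' = a) := by
  constructor
  · rintro ⟨t, ht⟩
    have hK : K = l ++ a :: t := by simpa using ht.symm
    subst hK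
    refine ⟨⟨a :: t, by simp⟩, by simp, ?_⟩
    simp [List.getD_eq_getElem?_getD]
  · rintro ⟨⟨t, ht⟩, hlt, hget⟩
    have hK : K = l ++ t := ht.symm
    subst hK
    cases t with
    | nil => simp at hlt
    | cons b t' =>
      have hb : b = a := by
        simpa [List.getD_eq_getElem?_getD, List.getElem?_append_right] using hget
      exact ⟨t', by simp [hb]⟩

theorem pv_cond_step (P K : List Char) (t j : Nat) (hj : j ≤ t) (ht : t < P.length) :
    pvCondF P K (t + 1) j
      = (pvCondF P K t j &&
          (decide ((t : Int) - (j : Int) < (K.length : Int)) &&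
            (PySem.List.pyGetD K ((t : Int) - (j : Int)) ' ' == P[t]))) := by
  have hcast : ((t : Int) - (j : Int)) = (((t - j : Nat)) : Int) := by omega
  rw [hcast, PySem.List.pyGetD_natCast]
  have hdec : decide ((((t - j : Nat)) : Int) < (K.length : Int)) = decide (t - j < K.length) := by
    simp
  rw [hdec]
  have hlenD : t - j < (P.drop j).length := by simp; omega
  have hsucc : t + 1 - j = (t - j) + 1 := by omega
  have htake : (P.drop j).take (t + 1 - j) = (P.drop j).take (t - j) ++ [P[t]] := by
    rw [hsucc, List.take_add_one]
    have : (P.drop j)[t - j]? = some P[t] := by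
      rw [List.getElem?_drop]
      have : j + (t - j) = t := by omega
      rw [this, List.getElem?_eq_getElem ht]
    rw [this]
    rfl
  have hlentake : ((P.drop j).take (t - j)).length = t - j := by
    simp; omega
  unfold pvCondF
  rw [htake]
  rw [Bool.eq_iff_iff]
  simp only [List.isPrefixOf_iff_prefix, Bool.and_eq_true, decide_eq_true_eq, beq_iff_eq]
  rw [pv_prefix_snoc, hlentake]

-- the sweep invariant: after t characters, alive = the surviving alignments, in increasing order
theorem pvB_alive_eq (P K : List Char) (t : Nat) (ht : t ≤ P.length) :
    (PySem.List.enumerate (P.take t) 0).foldl (fun alive ic => pvB_step K alive ic.1 ic.2) []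
      = ((List.range t).filter (pvCondF P K t)).map (fun (j : Nat) => (j : Int)) := by
  induction t with
  | zero => simp
  | succ t ih =>
    have ht' : t < P.length := by omega
    have htake : P.take (t + 1) = P.take t ++ [P[t]] := by
      rw [List.take_add_one, List.getElem?_eq_getElem ht']
      rfl
    have hlen : (P.take t).length = t := by simp; omega
    rw [htake, PySem.List.enumerate_append, List.foldl_append, ih (by omega), hlen]
    simp only [PySem.List.enumerate_cons, PySem.List.enumerate_nil, List.foldl_cons, List.foldl_nil]
    unfold pvB_step
    have hzt : (0 : Int) + (t : Int) = (t : Int) := by omega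
    rw [hzt]
    have hCt : pvCondF P K t t = true := by
      unfold pvCondF; simp
    have hmap : ((List.range t).filter (pvCondF P K t)).map (fun (j : Nat) => (j : Int)) ++ [(t : Int)]
        = ((List.range (t + 1)).filter (pvCondF P K t)).map (fun (j : Nat) => (j : Int)) := by
      rw [List.range_succ, List.filter_append]
      simp [hCt]
    rw [hmap, List.filter_map]
    have hfil : ((List.range (t + 1)).filter (pvCondF P K t)).filter
          ((fun j => decide ((t : Int) - j < (K.length : Int)) &&
            (PySem.List.pyGetD K ((t : Int) - j) ' ' == P[t])) ∘ (fun (j : Nat) => (j : Int)))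
        = (List.range (t + 1)).filter (pvCondF P K (t + 1)) := by
      rw [List.filter_filter]
      apply List.filter_congr
      intro j hjmem
      have hj : j ≤ t := by
        have := List.mem_range.mp hjmem; omega
      simp only [Function.comp_apply]
      rw [pv_cond_step P K t j hj ht', Bool.and_comm]
    rw [hfil]

-- B's per-key computation equals pvMergeN over the ascending range.
theorem pvB_key_eq (P K : List Char) :
    PySem.Chars.slice P none (some (pvB_overlapStart P K)) ++ K
      = pvMergeN P K (List.range P.length) := by
  have hmerge : ∀ js : List Nat, pvMergeN P K js
      = (match js.filter (fun j => PySem.Chars.startswith K (P.drop j)) with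
         | [] => P ++ K
         | j :: _ => P.take j ++ K) := by
    intro js
    induction js with
    | nil => rfl
    | cons j rest ih =>
      by_cases hc : PySem.Chars.startswith K (P.drop j)
      · simp [pvMergeN, hc]
      · simp only [pvMergeN, hc, if_false, List.filter_cons, Bool.false_eq_true]
        simpa [hc] using ih
  have hpred : ∀ j ∈ List.range P.length,
      pvCondF P K P.length j = PySem.Chars.startswith K (P.drop j) := by
    intro j hjmem
    have hj : j < P.length := List.mem_range.mp hjmem
    unfold pvCondF
    have : (P.drop j).take (P.length - j) = P.drop j := by
      apply List.take_of_length_le; simp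
    rw [this, Bool.eq_iff_iff, List.isPrefixOf_iff_prefix, PySem.Chars.startswith_iff]
  have halive := pvB_alive_eq P K P.length (le_refl _)
  rw [List.take_length] at halive
  unfold pvB_overlapStart
  rw [halive, hmerge, List.filter_congr hpred]
  cases hfil : (List.range P.length).filter (fun j => PySem.Chars.startswith K (P.drop j)) with
  | nil =>
    simp only [List.map_nil]
    rw [PySem.Chars.len_eq, PySem.Chars.slice_eq_listSlice, PySem.List.slice_to_natCast,
      List.take_length]
  | cons j0 rest =>
    simp only [List.map_cons]
    rw [PySem.Chars.slice_eq_listSlice, PySem.List.slice_to_natCast]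

-- ===== VERDICT helper glue is inlined in the theorem below =====
theorem ensure_dict_key_prefix_spec : Claim_equal_ensure_dict_key_prefix := by
  intro target_dict prefix_ _
  unfold Spec_ensure_dict_key_prefix ensure_dict_key_prefix ensure_dict_key_prefix_alt
  by_cases hp : prefix_ = ""
  · rw [if_pos hp, if_pos hp]
  · rw [if_neg hp, if_neg hp]
    congr 2
    funext d kv
    have hP : prefix_.toList ≠ [] := by
      simpa [String.toList_eq_nil_iff] using hp
    have hkeyA := pvA_key_eq prefix_.toList kv.1.toList hP
    have hkeyB := pvB_key_eq prefix_.toList kv.1.toList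
    have hlen : PySem.Str.len prefix_ = ((prefix_.toList.length : Nat) : Int) := by
      simp [PySem.Str.len_eq]
    rw [hlen]
    by_cases hc : PySem.Chars.startswith kv.1.toList prefix_.toList
    · rw [if_pos hc]
      rw [if_pos hc] at hkeyA
      rw [hkeyB, ← hkeyA, String.ofList_toList]
    · rw [if_neg hc]
      rw [if_neg hc] at hkeyA
      cases hov : pvA_overlap kv.1.toList prefix_.toList
          (PySem.List.pyRange ((prefix_.toList.length : Nat) : Int) 0 (-1)) with
      | some nk =>
        rw [hov] at hkeyA
        rw [hkeyB, ← hkeyA]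
      | none =>
        rw [hov] at hkeyA
        rw [hkeyB, ← hkeyA]
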